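-- pv_equiv track=rewrite | github.com/Hq030302/Enkripsi-Dekripsi-Audio-to-Image | matriks.py | matriks_plainteks
-- ===== SOURCE A (Python) =====
-- def matriks_plainteks(pcm_list):
--     blok_panjang = 16  # Panjang blok, sesuaikan dengan kebutuhan (misalnya, 16 untuk AES)
--
--     # Membagi list PCM menjadi blok-blok dengan panjang blok yang diinginkan
--     blok_pcm = [pcm_list[i:i+blok_panjang] for i in range(0, len(pcm_list), blok_panjang)]
--
--     # Mengonversi setiap blok PCM menjadi matriks 4x4
--     matriks_3d = []
--     for blok in blok_pcm:
--         matriks_4x4 = [blok[i:i+4] for i in range(0, len(blok), 4)]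
--         matriks_3d.append(matriks_4x4)
--
--     return matriks_3d
-- ===== SOURCE B (Python) =====
-- def matriks_plainteks(pcm_list):
--     # One single-pass accumulator helper that groups a list four at a time,
--     # applied twice: values -> rows, rows -> 4x4 matrices. No index arithmetic.
--     def group4(xs):
--         out = []
--         row = []
--         for x in xs:
--             row.append(x)
--             if len(row) == 4:
--                 out.append(row)
--                 row = []
--         if row:
--             out.append(row)
--         return out
--     return group4(group4(pcm_list))
-- ===== Notes on version B (the rewrite author's own statement) =====
-- stated objective: alternative
-- what changed: B replaces A's index-range slicing into 16-element blocks each re-split into rows by one single-pass accumulator helper that groups a list four at a time, applied twice (values to rows, rows to matrices), with no index arithmetic or slicing.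
import Mathlib
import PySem

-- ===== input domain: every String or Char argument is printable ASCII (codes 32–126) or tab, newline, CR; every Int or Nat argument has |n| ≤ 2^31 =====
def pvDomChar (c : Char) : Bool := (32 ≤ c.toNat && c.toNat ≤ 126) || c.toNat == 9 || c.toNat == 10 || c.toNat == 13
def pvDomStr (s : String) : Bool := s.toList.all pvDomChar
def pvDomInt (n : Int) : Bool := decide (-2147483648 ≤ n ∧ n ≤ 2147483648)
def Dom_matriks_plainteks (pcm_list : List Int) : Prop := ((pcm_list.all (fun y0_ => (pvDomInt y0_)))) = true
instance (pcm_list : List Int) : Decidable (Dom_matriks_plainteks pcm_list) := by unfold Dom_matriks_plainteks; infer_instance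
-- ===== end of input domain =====

-- B replaces A's index-range slicing into 16-blocks re-split into rows by one destructuring
-- chunk-by-4 helper applied twice (values -> rows, rows -> matrices); objective: simpler.

-- ===== PORT A =====
def matriks_plainteks (pcm_list : List Int) : List (List (List Int)) :=
  let blok_panjang : Int := 16
  let blok_pcm : List (List Int) :=
    (PySem.List.pyRange 0 pcm_list.length blok_panjang).map
      (fun i => PySem.List.slice pcm_list (some i) (some (i + blok_panjang)))
  let matriks_3d : List (List (List Int)) :=
    blok_pcm.foldl
      (fun acc blok =>
        acc ++ [(PySem.List.pyRange 0 blok.length 4).map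
                 (fun i => PySem.List.slice blok (some i) (some (i + 4)))])
      []
  matriks_3d

-- ===== PORT B =====
-- Source B's group4: a single for-loop accumulating (out, row), rows flushed at length 4,
-- a trailing partial row appended after the loop; applied twice.
def pvGroup4 {α : Type} (xs : List α) : List (List α) :=
  let st := xs.foldl
    (fun (s : List (List α) × List α) x =>
      let row := s.2 ++ [x]
      if row.length = 4 then (s.1 ++ [row], []) else (s.1, row))
    ([], [])
  st.1 ++ (if st.2 = [] then [] else [st.2])

def matriks_plainteks_alt (pcm_list : List Int) : List (List (List Int)) :=
  pvGroup4 (pvGroup4 pcm_list)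

-- ===== PRECONDITION & SPEC =====
def Spec_matriks_plainteks (pcm_list : List Int) (out : List (List (List Int))) : Prop := out = matriks_plainteks_alt pcm_list
instance (pcm_list : List Int) (out : List (List (List Int))) : Decidable (Spec_matriks_plainteks pcm_list out) := by unfold Spec_matriks_plainteks; infer_instance

-- ===== CLAIM (what is proved, stated in full; the proofs are below) =====
def Claim_equal_matriks_plainteks : Prop := ∀ (pcm_list : List Int), Dom_matriks_plainteks pcm_list → Spec_matriks_plainteks pcm_list (matriks_plainteks pcm_list)

-- ===== LEMMAS AND PROOFS =====

-- pvChunks k xs = xs cut into consecutive pieces of length k+1 (last piece may be shorter)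
def pvChunks {α : Type} (k : Nat) : List α → List (List α)
  | [] => []
  | x :: rest => (x :: rest.take k) :: pvChunks k (rest.drop k)
termination_by xs => xs.length
decreasing_by
  simp only [List.length_cons, List.length_drop]
  omega

theorem pvChunks_eq {α : Type} (k : Nat) (xs : List α) (h : xs ≠ []) :
    pvChunks k xs = xs.take (k+1) :: pvChunks k (xs.drop (k+1)) := by
  cases xs with
  | nil => exact absurd rfl h
  | cons x rest => simp [pvChunks, List.take_succ_cons, List.drop_succ_cons]

theorem pvChunks_nil_iff {α : Type} (k : Nat) (xs : List α) :
    pvChunks k xs = [] ↔ xs = [] := by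
  cases xs with
  | nil => simp [pvChunks]
  | cons x rest => simp [pvChunks]

-- positive-step range: nil and cons unfoldings
theorem pvRange_pos_nil (a b s : Int) (hs : 0 < s) (h : b ≤ a) :
    PySem.List.pyRange a b s = [] := by
  rw [PySem.List.pyRange_of_pos a b hs]
  simp [not_lt.mpr h]

theorem pvRange_pos_cons (a b s : Int) (hs : 0 < s) (h : a < b) :
    PySem.List.pyRange a b s = a :: PySem.List.pyRange (a + s) b s := by
  rw [PySem.List.pyRange_of_pos a b hs, PySem.List.pyRange_of_pos (a+s) b hs]
  have hc : ((b - a + s - 1) / s).toNat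
      = (if a + s < b then ((b - (a + s) + s - 1) / s).toNat else 0) + 1 := by
    have h1 : b - a + s - 1 = (b - (a + s) + s - 1) + 1 * s := by ring
    have h2 : (b - a + s - 1) / s = (b - (a + s) + s - 1) / s + 1 := by
      rw [h1, Int.add_mul_ediv_right _ 1 (by omega)]
    by_cases hab : a + s < b
    · simp only [if_pos hab]
      have hnn : 0 ≤ (b - (a + s) + s - 1) / s :=
        Int.ediv_nonneg (by omega) (by omega)
      omega
    · simp only [if_neg hab]
      have hz : (b - (a + s) + s - 1) / s = 0 := by
        apply Int.ediv_eq_zero_of_lt <;> omega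
      omega
  rw [if_pos h, hc, List.range_succ_eq_map]
  simp only [List.map_cons, List.map_map]
  congr 1
  · simp
  · apply List.map_congr_left
    intro k _
    simp only [Function.comp_apply]
    push_cast
    ring

-- the range-of-slices comprehension computes pvChunks of the suffix from a
theorem pvRangeChunk {α : Type} (k : Nat) (xs : List α) :
    ∀ (n a : Nat), xs.length ≤ a + n →
      ((PySem.List.pyRange (a : Int) xs.length ((k:Int)+1)).map
        (fun i => PySem.List.slice xs (some i) (some (i + ((k:Int)+1)))))
      = pvChunks k (xs.drop a) := by
  intro n
  induction n with
  | zero =>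
    intro a ha
    rw [pvRange_pos_nil _ _ _ (by omega) (by omega)]
    rw [List.drop_eq_nil_of_le (by omega)]
    simp [pvChunks]
  | succ m ih =>
    intro a ha
    by_cases hlt : a < xs.length
    · rw [pvRange_pos_cons _ _ _ (by omega) (by omega)]
      simp only [List.map_cons]
      have hstep : ((a:Int) + ((k:Int)+1)) = ((a + (k+1) : Nat) : Int) := by push_cast; ring
      have hb : a + (k+1) - a = k+1 := by omega
      have hhead : PySem.List.slice xs (some (a:Int)) (some ((a:Int) + ((k:Int)+1)))
          = (xs.drop a).take (k+1) := by
        rw [hstep, PySem.List.slice_natCast, hb]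
      rw [hhead, hstep, ih (a + (k+1)) (by omega)]
      rw [pvChunks_eq k (xs.drop a) (by
        intro hnil
        have := List.drop_eq_nil_iff.mp hnil
        omega)]
      congr 1
      rw [List.drop_drop]
    · rw [pvRange_pos_nil _ _ _ (by omega) (by omega)]
      rw [List.drop_eq_nil_of_le (by omega)]
      simp [pvChunks]

-- a = 0 corollary in the exact shape port A produces
theorem pvRangeChunk0 {α : Type} (k : Nat) (xs : List α) :
    ((PySem.List.pyRange 0 xs.length ((k:Int)+1)).map
      (fun i => PySem.List.slice xs (some i) (some (i + ((k:Int)+1)))))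
    = pvChunks k xs := by
  have := pvRangeChunk k xs xs.length 0 (by omega)
  simpa using this

-- foldl that pushes f b on the right is map
theorem pvFoldlPush {α β : Type} (f : α → β) :
    ∀ (l : List α) (init : List β),
      l.foldl (fun acc b => acc ++ [f b]) init = init ++ l.map f := by
  intro l
  induction l with
  | nil => simp
  | cons x rest ih => intro init; simp [List.foldl_cons, ih]

-- chunking distributes over ++ when the first part's length is a multiple of the chunk size
theorem pvChunks_append {α : Type} (k : Nat) :
    ∀ (m : Nat) (a b : List α), a.length = (k+1) * m →
      pvChunks k (a ++ b) = pvChunks k a ++ pvChunks k b := by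
  intro m
  induction m with
  | zero =>
    intro a b ha
    have : a = [] := List.eq_nil_of_length_eq_zero (by omega)
    simp [this, pvChunks]
  | succ j ih =>
    intro a b ha
    have hmul : (k+1) * (j+1) = (k+1) * j + (k+1) := by ring
    have hlen : k + 1 ≤ a.length := by omega
    have hane : a ≠ [] := by intro h; simp [h] at hlen
    have habne : a ++ b ≠ [] := by
      intro h; exact hane (List.append_eq_nil_iff.mp h).1
    rw [pvChunks_eq k (a ++ b) habne, pvChunks_eq k a hane]
    rw [List.take_append_of_le_length hlen, List.drop_append_of_le_length hlen]
    rw [ih (a.drop (k+1)) b (by simp only [List.length_drop]; omega)]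
    simp

-- B's loop invariant: folding from (out, row) and flushing appends chunk-by-4 of row ++ xs
theorem pvGroup4_inv {α : Type} :
    ∀ (xs : List α) (out : List (List α)) (row : List α), row.length ≤ 3 →
      (let st := xs.foldl
          (fun (s : List (List α) × List α) x =>
            let row := s.2 ++ [x]
            if row.length = 4 then (s.1 ++ [row], []) else (s.1, row))
          (out, row)
       st.1 ++ (if st.2 = [] then [] else [st.2])) = out ++ pvChunks 3 (row ++ xs) := by
  intro xs
  induction xs with
  | nil =>
    intro out row hrow
    simp only [List.foldl_nil, List.append_nil]
    by_cases hr : row = []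
    · simp [hr, pvChunks]
    · rw [if_neg hr, pvChunks_eq 3 row hr,
        List.take_of_length_le (by omega), List.drop_eq_nil_of_le (by omega)]
      simp [pvChunks]
  | cons x rest ih =>
    intro out row hrow
    simp only [List.foldl_cons]
    by_cases h4 : (row ++ [x]).length = 4
    · simp only [h4, if_pos]
      rw [ih (out ++ [row ++ [x]]) [] (by simp)]
      have hsplit : pvChunks 3 ((row ++ [x]) ++ rest)
          = pvChunks 3 (row ++ [x]) ++ pvChunks 3 rest :=
        pvChunks_append 3 1 _ _ (by omega)
      have hone : pvChunks 3 (row ++ [x]) = [row ++ [x]] := by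
        rw [pvChunks_eq 3 _ (by simp),
          List.take_of_length_le (by omega), List.drop_eq_nil_of_le (by omega)]
        simp [pvChunks]
      rw [List.append_cons row x rest, hsplit, hone]
      simp
    · rw [if_neg h4]
      rw [ih out (row ++ [x]) (by simp at h4 ⊢; omega)]
      rw [List.append_cons row x rest]

-- B's helper is exactly chunking by 4
theorem pvGroup4_eq_chunks {α : Type} (xs : List α) :
    pvGroup4 xs = pvChunks 3 xs := by
  have := pvGroup4_inv xs [] [] (by simp)
  simpa [pvGroup4] using this

theorem pvChunks_length3 : ∀ (n : Nat) (xs : List Int), xs.length ≤ n →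
    (pvChunks 3 xs).length = (xs.length + 3) / 4 := by
  intro n
  induction n with
  | zero =>
    intro xs h
    have : xs = [] := List.eq_nil_of_length_eq_zero (by omega)
    simp [this, pvChunks]
  | succ m ih =>
    intro xs h
    by_cases hx : xs = []
    · simp [hx, pvChunks]
    · rw [pvChunks_eq 3 xs hx]
      have h1 : 1 ≤ xs.length := List.length_pos_iff.mpr hx
      rw [List.length_cons, ih (xs.drop 4) (by simp only [List.length_drop]; omega)]
      simp only [List.length_drop]
      omega

-- the core reshaping identity: 16-chunks each split into 4-rows = rows grouped by 4
theorem pvChunksMain : ∀ (n : Nat) (xs : List Int), xs.length ≤ n →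
    (pvChunks 15 xs).map (pvChunks 3) = pvChunks 3 (pvChunks 3 xs) := by
  intro n
  induction n with
  | zero =>
    intro xs h
    have : xs = [] := List.eq_nil_of_length_eq_zero (by omega)
    simp [this, pvChunks]
  | succ m ih =>
    intro xs h
    by_cases hx : xs = []
    · simp [hx, pvChunks]
    · rw [pvChunks_eq 15 xs hx]
      simp only [List.map_cons]
      have e1 : (15:Nat)+1 = 16 := by norm_num
      have e2 : (3:Nat)+1 = 4 := by norm_num
      rw [e1]
      have h1 : 1 ≤ xs.length := List.length_pos_iff.mpr hx
      rw [ih (xs.drop 16) (by simp only [List.length_drop]; omega)]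
      by_cases hbig : 16 ≤ xs.length
      · have hsplit : pvChunks 3 xs
            = pvChunks 3 (xs.take 16) ++ pvChunks 3 (xs.drop 16) := by
          conv_lhs => rw [← List.take_append_drop 16 xs]
          exact pvChunks_append 3 4 _ _ (by simp only [List.length_take]; omega)
        have hlen4 : (pvChunks 3 (xs.take 16)).length = 4 := by
          rw [pvChunks_length3 16 (xs.take 16) (by simp [List.length_take])]
          simp only [List.length_take]
          omega
        have hne : pvChunks 3 (xs.take 16) ≠ [] := by
          intro hnil; rw [hnil] at hlen4; simp at hlen4
        have hne2 : pvChunks 3 (xs.take 16) ++ pvChunks 3 (xs.drop 16) ≠ [] := by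
          intro hnil; exact hne (List.append_eq_nil_iff.mp hnil).1
        have t1 : (pvChunks 3 (xs.take 16) ++ pvChunks 3 (xs.drop 16)).take 4
            = pvChunks 3 (xs.take 16) := by
          rw [List.take_append_of_le_length (by omega), List.take_of_length_le (by omega)]
        have t2 : (pvChunks 3 (xs.take 16) ++ pvChunks 3 (xs.drop 16)).drop 4
            = pvChunks 3 (xs.drop 16) := by
          rw [List.drop_append_of_le_length (by omega), List.drop_eq_nil_of_le (by omega)]
          simp
        rw [hsplit, pvChunks_eq 3 (pvChunks 3 (xs.take 16) ++ pvChunks 3 (xs.drop 16)) hne2, e2, t1, t2]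
      · have hdrop : xs.drop 16 = [] := List.drop_eq_nil_of_le (by omega)
        have hxs16 : xs.take 16 = xs := List.take_of_length_le (by omega)
        rw [hdrop, hxs16]
        have hr : (pvChunks 3 xs).length ≤ 4 := by
          rw [pvChunks_length3 16 xs (by omega)]; omega
        have hrne : pvChunks 3 xs ≠ [] := by
          rw [Ne, pvChunks_nil_iff]; exact hx
        rw [pvChunks_eq 3 (pvChunks 3 xs) hrne, e2]
        rw [List.take_of_length_le hr, List.drop_eq_nil_of_le hr]
        simp [pvChunks]

-- ===== VERDICT (by name: the statement is the Claim_ definition above) =====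
theorem matriks_plainteks_spec : Claim_equal_matriks_plainteks := by
  intro xs _
  unfold Spec_matriks_plainteks matriks_plainteks matriks_plainteks_alt
  simp only []
  rw [pvFoldlPush]
  simp only [List.nil_append]
  have h16 : (16:Int) = ((15:Nat):Int) + 1 := by norm_num
  have h4 : (4:Int) = ((3:Nat):Int) + 1 := by norm_num
  rw [h16, h4]
  rw [pvRangeChunk0 15 xs]
  rw [List.map_congr_left (fun blok _ => pvRangeChunk0 3 blok)]
  rw [pvGroup4_eq_chunks xs, pvGroup4_eq_chunks (pvChunks 3 xs)]
  exact pvChunksMain xs.length xs (le_refl _)
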